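-- pv_equiv track=rewrite | github.com/rhddnjs1974/Backjoon | 21~25diamond/4464.py | vam
-- ===== SOURCE A (Python) =====
-- def vam(x):
--     x = str(x)
--     f = 0
--     for i in x:
--         if i=="0":
--             if f==1:
--                 return False
--             f=1
--         else:
--             f=0
--     return True
-- ===== SOURCE B (Python) =====
-- def vam(x):
--     n = abs(x)
--     while n >= 100:
--         if n % 100 == 0:
--             return False
--         n //= 10
--     return True
-- ===== Notes on version B (the rewrite author's own statement) =====
-- stated objective: alternative
-- what changed: Replaces A's string conversion and per-character flag scan with pure integer arithmetic: repeatedly test n % 100 == 0 while shifting with n //= 10, never building a string.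
import Mathlib
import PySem

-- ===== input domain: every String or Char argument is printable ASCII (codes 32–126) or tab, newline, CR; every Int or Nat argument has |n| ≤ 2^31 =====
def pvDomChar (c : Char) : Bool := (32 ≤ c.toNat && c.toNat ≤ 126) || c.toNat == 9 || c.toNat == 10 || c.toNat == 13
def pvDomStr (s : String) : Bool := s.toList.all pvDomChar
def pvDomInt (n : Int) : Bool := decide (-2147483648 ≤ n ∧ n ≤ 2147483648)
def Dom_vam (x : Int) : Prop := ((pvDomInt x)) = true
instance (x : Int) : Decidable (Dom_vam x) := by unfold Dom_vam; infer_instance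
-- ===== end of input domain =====

-- B replaces A's string conversion and per-character flag scan by pure integer
-- arithmetic: repeatedly test n % 100 == 0 while dividing n by 10 (alternative).

-- ===== PORT A =====
-- the for-loop over the characters of str(x), with flag f and early 'return False'
def vamLoop : List Char → Int → Bool
  | [], _ => true
  | c :: rest, f =>
    if c == '0' then
      if f == 1 then false else vamLoop rest 1
    else vamLoop rest 0

def vam (x : Int) : Bool := vamLoop (PySem.Int.toStr x).toList 0

-- ===== PORT B =====
-- Source B's while-loop 'while n >= 100: if n % 100 == 0: return False; n //= 10'.
-- The first argument is fuel making the recursion structural; n+1 always suffices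
-- since n strictly decreases (n //= 10) every iteration.
def vamAltLoop : Nat → Nat → Bool
  | 0, _ => true
  | g + 1, n =>
    if 100 ≤ n then
      if n % 100 = 0 then false else vamAltLoop g (n / 10)
    else true

def vam_alt (x : Int) : Bool := vamAltLoop (x.natAbs + 1) x.natAbs

-- ===== PRECONDITION & SPEC =====
def Spec_vam (x : Int) (out : Bool) : Prop := out = vam_alt x
instance (x : Int) (out : Bool) : Decidable (Spec_vam x out) := by unfold Spec_vam; infer_instance

-- ===== CLAIM (what is proved, stated in full; the proofs are below) =====
def Claim_equal_vam : Prop := ∀ (x : Int), Dom_vam x → Spec_vam x (vam x)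

-- ===== LEMMAS AND PROOFS =====

theorem prefix_zero_head : ∀ (l : List Char), (['0'] <+: l) ↔ l.head? = some '0'
  | [] => by simp
  | c :: t => by simp [List.cons_prefix_cons, eq_comm]

theorem prefix_00_cons (c : Char) (t : List Char) :
    (['0', '0'] <+: c :: t) ↔ c = '0' ∧ t.head? = some '0' := by
  rw [List.cons_prefix_cons, prefix_zero_head]
  simp [eq_comm]

theorem infix00_cons (c : Char) (t : List Char) :
    (['0', '0'] <:+: c :: t) ↔ (c = '0' ∧ t.head? = some '0') ∨ ['0', '0'] <:+: t := by
  rw [List.infix_cons_iff, prefix_00_cons]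

-- A's loop with flag 0 detects exactly an infix "00"; with flag 1 also a leading '0'
theorem vamLoop_char : ∀ (l : List Char),
    (vamLoop l 0 = !decide (['0', '0'] <:+: l)) ∧
    (vamLoop l 1 = !decide (['0', '0'] <:+: l ∨ l.head? = some '0'))
  | [] => by simp [vamLoop]
  | c :: rest => by
    obtain ⟨ih0, ih1⟩ := vamLoop_char rest
    constructor
    · show (if c == '0' then if (0 : Int) == 1 then false else vamLoop rest 1
              else vamLoop rest 0) = _
      by_cases hc : c = '0'
      · subst hc
        rw [if_pos (by decide), if_neg (by decide), ih1]
        congr 1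
        rw [decide_eq_decide, infix00_cons]
        tauto
      · rw [if_neg (by simpa using hc), ih0]
        congr 1
        rw [decide_eq_decide, infix00_cons]
        tauto
    · show (if c == '0' then if (1 : Int) == 1 then false else vamLoop rest 1
              else vamLoop rest 0) = _
      by_cases hc : c = '0'
      · subst hc; simp
      · rw [if_neg (by simpa using hc), ih0]
        congr 1
        rw [decide_eq_decide, infix00_cons]
        simp only [List.head?_cons, Option.some.injEq]
        tauto

theorem infix00_reverse (l : List Char) :
    (['0', '0'] <:+: l.reverse) ↔ (['0', '0'] <:+: l) := by
  have h := @List.reverse_infix _ ['0', '0'] l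
  simpa using h

theorem infix00_append (l : List Char) (c : Char) :
    (['0', '0'] <:+: l ++ [c]) ↔ ((['0', '0'] <:+: l) ∨ (c = '0' ∧ l.getLast? = some '0')) := by
  rw [← infix00_reverse (l ++ [c]), List.reverse_append]
  simp only [List.reverse_cons, List.reverse_nil, List.nil_append, List.singleton_append]
  rw [infix00_cons, List.head?_reverse, infix00_reverse]
  tauto

-- the accumulator of Nat.toDigitsCore is appended on the right
theorem tdc_acc : ∀ (f n : Nat) (ds : List Char),
    Nat.toDigitsCore 10 f n ds = Nat.toDigitsCore 10 f n [] ++ ds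
  | 0, _, _ => by simp [Nat.toDigitsCore]
  | f + 1, n, ds => by
    simp only [Nat.toDigitsCore]
    by_cases hx : n / 10 = 0
    · simp [hx]
    · simp only [hx, if_false]
      rw [tdc_acc f (n / 10) (Nat.digitChar (n % 10) :: ds),
        tdc_acc f (n / 10) [Nat.digitChar (n % 10)]]
      simp

-- Nat.toDigitsCore is fuel-independent once the fuel exceeds n
theorem tdc_fuel (n : Nat) : ∀ (f₁ f₂ : Nat) (ds : List Char), n < f₁ → n < f₂ →
    Nat.toDigitsCore 10 f₁ n ds = Nat.toDigitsCore 10 f₂ n ds := by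
  induction n using Nat.strong_induction_on with
  | _ n ih =>
    intro f₁ f₂ ds h1 h2
    cases f₁ with
    | zero => omega
    | succ g₁ =>
      cases f₂ with
      | zero => omega
      | succ g₂ =>
        simp only [Nat.toDigitsCore]
        by_cases hx : n / 10 = 0
        · simp [hx]
        · simp only [hx, if_false]
          have hlt : n / 10 < n := by omega
          exact ih (n / 10) hlt g₁ g₂ _ (by omega) (by omega)

-- peeling the last decimal digit off Nat.toDigits
theorem toDigits_peel (n : Nat) (h : 10 ≤ n) :
    Nat.toDigits 10 n = Nat.toDigits 10 (n / 10) ++ [Nat.digitChar (n % 10)] := by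
  have hx : ¬ (n / 10 = 0) := by omega
  show Nat.toDigitsCore 10 (n + 1) n [] = _
  simp only [Nat.toDigitsCore, hx, if_false]
  rw [tdc_acc n (n / 10) [Nat.digitChar (n % 10)],
    tdc_fuel (n / 10) n ((n / 10) + 1) [] (by omega) (by omega)]
  rfl

theorem toDigits_getLast (n : Nat) :
    (Nat.toDigits 10 n).getLast? = some (Nat.digitChar (n % 10)) := by
  by_cases h : n < 10
  · exact (by decide :
      ∀ m, m < 10 → (Nat.toDigits 10 m).getLast? = some (Nat.digitChar (m % 10))) n h
  · rw [toDigits_peel n (by omega), List.getLast?_concat]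

theorem digitChar_zero : ∀ m, m < 10 → ((Nat.digitChar m = '0') ↔ m = 0) := by decide

theorem small_no_00 : ∀ m, m < 100 → ¬ (['0', '0'] <:+: Nat.toDigits 10 m) := by decide

-- B's loop decides exactly "no infix 00 in the decimal digits"
theorem vamAltLoop_char (n : Nat) : ∀ f, n < f →
    vamAltLoop f n = !decide (['0', '0'] <:+: Nat.toDigits 10 n) := by
  induction n using Nat.strong_induction_on with
  | _ n ih =>
    intro f hf
    cases f with
    | zero => omega
    | succ g =>
      by_cases h100 : 100 ≤ n
      · show (if 100 ≤ n then if n % 100 = 0 then false else vamAltLoop g (n / 10)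
              else true) = _
        rw [if_pos h100, toDigits_peel n (by omega)]
        have hiff : (['0', '0'] <:+: Nat.toDigits 10 (n / 10) ++ [Nat.digitChar (n % 10)]) ↔
            ((['0', '0'] <:+: Nat.toDigits 10 (n / 10)) ∨ n % 100 = 0) := by
          rw [infix00_append, toDigits_getLast (n / 10)]
          constructor
          · rintro (h | ⟨h1, h2⟩)
            · exact Or.inl h
            · refine Or.inr ?_
              have e1 : n % 10 = 0 := (digitChar_zero _ (by omega)).mp h1
              have e2 : (n / 10) % 10 = 0 := by
                have := Option.some.inj h2
                exact (digitChar_zero _ (by omega)).mp this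
              omega
          · rintro (h | h)
            · exact Or.inl h
            · refine Or.inr ⟨(digitChar_zero _ (by omega)).mpr (by omega), ?_⟩
              rw [(digitChar_zero ((n / 10) % 10) (by omega)).mpr (by omega)]
        by_cases hz : n % 100 = 0
        · rw [if_pos hz]
          have hin : (['0', '0'] <:+: Nat.toDigits 10 (n / 10) ++ [Nat.digitChar (n % 10)]) :=
            hiff.mpr (Or.inr hz)
          simp [hin]
        · rw [if_neg hz, ih (n / 10) (by omega) g (by omega)]
          congr 1
          rw [decide_eq_decide, hiff]
          tauto
      · show (if 100 ≤ n then if n % 100 = 0 then false else vamAltLoop g (n / 10)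
              else true) = _
        rw [if_neg h100]
        have := small_no_00 n (by omega)
        simp [this]

-- ===== VERDICT (by name: the statement is the Claim_ definition above) =====
theorem vam_spec : Claim_equal_vam := by
  intro x _
  show vam x = vam_alt x
  unfold vam vam_alt
  rw [(vamLoop_char (PySem.Int.toStr x).toList).1, PySem.Int.toList_toStr,
    vamAltLoop_char x.natAbs (x.natAbs + 1) (by omega)]
  unfold PySem.Int.toChars
  by_cases hx : x < 0
  · rw [if_pos hx]
    congr 1
    rw [decide_eq_decide, infix00_cons]
    simp
  · rw [if_neg hx]
    have h : x.toNat = x.natAbs := by omega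
    rw [h]
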